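-- pv_equiv track=rewrite | github.com/Raizus/sudoku-solver | puzzlesolver/Puzzle2model/PuzzleSolutionPrinter.py | are_solutions_equal
-- ===== SOURCE A (Python) =====
-- def are_solutions_equal(solution1: dict[tuple[int, int], int], solution2: dict[tuple[int, int], int]) -> bool:
--     for key, val in solution1.items():
--         val2 = solution2.get(key)
--         if val2 is None:
--             return False
--         if val != val2:
--             return False
--     return True
-- ===== SOURCE B (Python) =====
-- def are_solutions_equal(solution1: dict[tuple[int, int], int], solution2: dict[tuple[int, int], int]) -> bool:
--     # solution1's items are all in solution2 iff overlaying solution1 onto solution2 changes nothing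
--     return {**solution2, **solution1} == solution2
-- ===== Notes on version B (the rewrite author's own statement) =====
-- stated objective: simpler
-- what changed: Instead of looping over solution1's keys with .get lookups and early returns, B builds the merged dict {**solution2, **solution1} and tests whole-dict equality with solution2: the overlay changes nothing exactly when every (key, value) pair of solution1 is already in solution2.
import Mathlib
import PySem

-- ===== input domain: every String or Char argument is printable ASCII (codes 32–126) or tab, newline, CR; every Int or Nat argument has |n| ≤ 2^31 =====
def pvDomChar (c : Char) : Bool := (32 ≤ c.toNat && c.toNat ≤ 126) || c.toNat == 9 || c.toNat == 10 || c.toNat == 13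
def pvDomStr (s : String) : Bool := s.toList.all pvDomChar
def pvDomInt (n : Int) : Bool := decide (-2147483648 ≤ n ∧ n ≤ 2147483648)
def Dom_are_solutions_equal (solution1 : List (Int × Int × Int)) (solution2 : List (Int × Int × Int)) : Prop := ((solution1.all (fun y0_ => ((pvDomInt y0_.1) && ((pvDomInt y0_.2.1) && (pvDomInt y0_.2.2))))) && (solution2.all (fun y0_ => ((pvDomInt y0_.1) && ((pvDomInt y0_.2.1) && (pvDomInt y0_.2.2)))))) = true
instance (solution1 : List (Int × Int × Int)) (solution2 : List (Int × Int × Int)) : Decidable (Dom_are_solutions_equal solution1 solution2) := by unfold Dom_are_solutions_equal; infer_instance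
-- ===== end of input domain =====

-- B replaces A's key-by-key loop (with .get lookups and early returns) by building the
-- overlay dict {**solution2, **solution1} and testing whole-dict equality with solution2.

-- Both arguments are Python dicts; the triple list (a, b, v) encodes the entry (a, b) ↦ v,
-- and the dict is built in insertion order (later duplicate keys overwrite), shared by both ports.
def pvDictOf (l : List (Int × Int × Int)) : PySem.Dict (Int × Int) Int :=
  PySem.Dict.ofList (l.map (fun t => ((t.1, t.2.1), t.2.2)))

-- ===== PORT A =====
-- the 'for key, val in solution1.items():' loop with its two early returns
def pvLoopA (d2 : PySem.Dict (Int × Int) Int) : List ((Int × Int) × Int) → Bool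
  | [] => true
  | (key, val) :: rest =>
    match d2.get? key with
    | none => false
    | some val2 => if val ≠ val2 then false else pvLoopA d2 rest

def are_solutions_equal (solution1 : List (Int × Int × Int)) (solution2 : List (Int × Int × Int)) : Bool :=
  pvLoopA (pvDictOf solution2) (pvDictOf solution1).items

-- ===== PORT B =====
-- {**solution2, **solution1}: start from solution2 and overwrite with solution1's entries
def pvOverlay (d1 d2 : PySem.Dict (Int × Int) Int) : PySem.Dict (Int × Int) Int :=
  d1.items.foldl (fun d p => d.insert p.1 p.2) d2

-- Python dict '==' ignores insertion order: same size and every pair of the left dict found in the right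
def pvDictEq (a b : PySem.Dict (Int × Int) Int) : Bool :=
  a.size == b.size && a.items.all (fun p => b.get? p.1 == some p.2)

def are_solutions_equal_alt (solution1 : List (Int × Int × Int)) (solution2 : List (Int × Int × Int)) : Bool :=
  pvDictEq (pvOverlay (pvDictOf solution1) (pvDictOf solution2)) (pvDictOf solution2)

-- ===== PRECONDITION & SPEC =====
def Spec_are_solutions_equal (solution1 : List (Int × Int × Int)) (solution2 : List (Int × Int × Int)) (out : Bool) : Prop := out = are_solutions_equal_alt solution1 solution2
instance (solution1 : List (Int × Int × Int)) (solution2 : List (Int × Int × Int)) (out : Bool) : Decidable (Spec_are_solutions_equal solution1 solution2 out) := by unfold Spec_are_solutions_equal; infer_instance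

-- ===== CLAIM (what is proved, stated in full; the proofs are below) =====
def Claim_equal_are_solutions_equal : Prop := ∀ (solution1 : List (Int × Int × Int)) (solution2 : List (Int × Int × Int)), Dom_are_solutions_equal solution1 solution2 → Spec_are_solutions_equal solution1 solution2 (are_solutions_equal solution1 solution2)

-- ===== LEMMAS AND PROOFS =====

-- A's loop is the conjunction 'every pair of l is found in d2 with that value'
lemma loopA_eq_all (d2 : PySem.Dict (Int × Int) Int) :
    ∀ l : List ((Int × Int) × Int),
      pvLoopA d2 l = l.all (fun p => d2.get? p.1 == some p.2)
  | [] => rfl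
  | (key, val) :: rest => by
    rw [List.all_cons, ← loopA_eq_all d2 rest]
    rcases h : d2.get? key with _ | val2
    · simp [pvLoopA, h]
    · by_cases hv : val = val2
      · simp [pvLoopA, h, hv]
      · simp [pvLoopA, h, hv, Ne.symm hv]

-- a fold of inserts over keys avoiding k leaves the lookup at k unchanged
lemma get?_foldl_insert_not_mem (l : List ((Int × Int) × Int)) (d : PySem.Dict (Int × Int) Int)
    (k : Int × Int) (hk : k ∉ l.map (·.1)) :
    (l.foldl (fun d p => d.insert p.1 p.2) d).get? k = d.get? k := by
  induction l generalizing d with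
  | nil => rfl
  | cons p rest ih =>
    simp only [List.map_cons, List.mem_cons, not_or] at hk
    rw [List.foldl_cons, ih _ hk.2, PySem.Dict.get?_insert]
    simp [hk.1]

-- a fold of inserts over duplicate-free pairs realises each pair at lookup
lemma get?_foldl_insert_mem (l : List ((Int × Int) × Int)) (d : PySem.Dict (Int × Int) Int)
    (hnd : (l.map (·.1)).Nodup) (k : Int × Int) (v : Int) (hm : (k, v) ∈ l) :
    (l.foldl (fun d p => d.insert p.1 p.2) d).get? k = some v := by
  induction l generalizing d with
  | nil => cases hm
  | cons p rest ih =>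
    simp only [List.map_cons, List.nodup_cons] at hnd
    rcases List.mem_cons.mp hm with h | h
    · subst h
      rw [List.foldl_cons, get?_foldl_insert_not_mem _ _ _ hnd.1]
      exact PySem.Dict.get?_insert_self _ _ _
    · rw [List.foldl_cons]
      exact ih _ hnd.2 h

-- updating a set with elements it already has changes nothing
lemma set_update_eq_self (s : PySem.Set (Int × Int)) (xs : List (Int × Int))
    (h : ∀ x ∈ xs, x ∈ s) : PySem.Set.update s xs = s := by
  induction xs generalizing s with
  | nil => rfl
  | cons x rest ih =>
    have hx : PySem.Set.add s x = s := by
      simp [PySem.Set.add, PySem.Set.contains, h x (List.mem_cons_self ..)]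
    simpa [PySem.Set.update, hx] using
      ih s (fun y hy => h y (List.mem_cons_of_mem _ hy))

-- a key of a dict carries some value in items
lemma mem_keys_exists_val (d : PySem.Dict (Int × Int) Int) (k : Int × Int)
    (h : k ∈ d.keys) : ∃ v, (k, v) ∈ d.items := by
  simp only [PySem.Dict.keys, List.mem_map] at h
  obtain ⟨p, hp, hpk⟩ := h
  exact ⟨p.2, by rwa [← hpk, Prod.mk.eta]⟩

-- the central equivalence, for arbitrary duplicate-free dicts d1 d2
lemma overlay_eq_iff_loop (d1 d2 : PySem.Dict (Int × Int) Int)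
    (hnd1 : d1.keys.Nodup) (hnd2 : d2.keys.Nodup) :
    pvDictEq (pvOverlay d1 d2) d2 = pvLoopA d2 d1.items := by
  have hkeys1 : d1.items.map (·.1) = d1.keys := rfl
  have hmkeys : (pvOverlay d1 d2).keys = PySem.Set.update d2.keys d1.keys := by
    have := PySem.Dict.keys_foldl_insert_key d1.items (·.1) (fun _ p => p.2) d2
    simpa [pvOverlay, hkeys1] using this
  have hndm : (pvOverlay d1 d2).keys.Nodup :=
    PySem.Dict.nodup_keys_foldl_insert_key d1.items (·.1) (fun _ p => p.2) d2 hnd2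
  rw [loopA_eq_all, pvDictEq, Bool.eq_iff_iff, Bool.and_eq_true]
  simp only [List.all_eq_true, beq_iff_eq]
  constructor
  · rintro ⟨-, hall⟩ p hp
    have : (pvOverlay d1 d2).get? p.1 = some p.2 :=
      get?_foldl_insert_mem d1.items d2 (hkeys1 ▸ hnd1) p.1 p.2 (by simpa using hp)
    exact hall (p.1, p.2) (PySem.Dict.mem_items_of_get?_eq_some _ this)
  · intro h
    constructor
    · -- sizes agree: every key of d1 is a key of d2, so the overlay adds no key
      have hsub : ∀ k ∈ d1.keys, k ∈ d2.keys := by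
        intro k hk
        obtain ⟨v, hv⟩ := mem_keys_exists_val d1 k hk
        have h2 : d2.get? k = some v := h (k, v) hv
        have := PySem.Dict.mem_items_of_get?_eq_some _ h2
        exact PySem.Dict.mem_keys_of_mem_items _ this
      have : (pvOverlay d1 d2).keys = d2.keys := by
        rw [hmkeys, set_update_eq_self _ _ hsub]
      have hlen : (pvOverlay d1 d2).items.length = d2.items.length := by
        have := congrArg List.length this
        simpa [PySem.Dict.keys] using this
      simpa [PySem.Dict.size] using hlen
    · -- every pair of the overlay is found in d2
      intro p hp
      have hget : (pvOverlay d1 d2).get? p.1 = some p.2 := by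
        rw [← Prod.mk.eta (p := p)] at hp
        exact PySem.Dict.get?_of_mem_items _ hp hndm
      by_cases hk : p.1 ∈ d1.items.map (·.1)
      · simp only [List.mem_map] at hk
        obtain ⟨q, hq, hq1⟩ := hk
        have := get?_foldl_insert_mem d1.items d2 (hkeys1 ▸ hnd1) q.1 q.2 (by simpa using hq)
        rw [hq1] at this
        have hv : p.2 = q.2 := by
          have := hget.symm.trans (by simpa [pvOverlay] using this)
          exact (Option.some_inj.mp this)
        rw [hv, ← hq1]
        exact h (q.1, q.2) (by simpa using hq)
      · rw [← hget, pvOverlay, get?_foldl_insert_not_mem _ _ _ hk]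

-- ===== VERDICT (by name: the statement is the Claim_ definition above) =====
theorem are_solutions_equal_spec : Claim_equal_are_solutions_equal := by
  intro s1 s2 _
  unfold Spec_are_solutions_equal are_solutions_equal are_solutions_equal_alt
  exact (overlay_eq_iff_loop _ _ (PySem.Dict.nodup_keys_ofList _)
    (PySem.Dict.nodup_keys_ofList _)).symm
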